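-- pv_equiv track=rewrite | github.com/inspirehep/inspire-schemas | inspire_schemas/builders.py | is_citeable
-- ===== SOURCE A (Python) =====
-- def is_citeable(publication_info):
--     """Check some fields in order to define if the article is citeable.
--
--     :param publication_info: publication_info field
--     already populated
--     :type publication_info: list
--     """
--     def _item_has_pub_info(item):
--         return all(
--             key in item for key in (
--                 'journal_title', 'journal_volume'
--             )
--         )
--
--     def _item_has_page_or_artid(item):
--         return any(
--             key in item for key in (
--                 'page_start', 'artid'
--             )
--         )
--
--     has_pub_info = any(
--         _item_has_pub_info(item) for item in publication_info
--     )
--     has_page_or_artid = any(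
--         _item_has_page_or_artid(item) for item in publication_info
--     )
--
--     return has_pub_info and has_page_or_artid
-- ===== SOURCE B (Python) =====
-- def is_citeable(publication_info):
--     """Single pass over publication_info maintaining two flags, with early exit."""
--     has_pub_info = False
--     has_page_or_artid = False
--     for item in publication_info:
--         has_pub_info = has_pub_info or (
--             'journal_title' in item and 'journal_volume' in item)
--         has_page_or_artid = has_page_or_artid or (
--             'page_start' in item or 'artid' in item)
--         if has_pub_info and has_page_or_artid:
--             return True
--     return has_pub_info and has_page_or_artid
-- ===== Notes on version B (the rewrite author's own statement) =====
-- stated objective: alternative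
-- what changed: Replaces A's two separate any(...) scans of publication_info with one loop that maintains two boolean flags and returns early once both are set.
import Mathlib
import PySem

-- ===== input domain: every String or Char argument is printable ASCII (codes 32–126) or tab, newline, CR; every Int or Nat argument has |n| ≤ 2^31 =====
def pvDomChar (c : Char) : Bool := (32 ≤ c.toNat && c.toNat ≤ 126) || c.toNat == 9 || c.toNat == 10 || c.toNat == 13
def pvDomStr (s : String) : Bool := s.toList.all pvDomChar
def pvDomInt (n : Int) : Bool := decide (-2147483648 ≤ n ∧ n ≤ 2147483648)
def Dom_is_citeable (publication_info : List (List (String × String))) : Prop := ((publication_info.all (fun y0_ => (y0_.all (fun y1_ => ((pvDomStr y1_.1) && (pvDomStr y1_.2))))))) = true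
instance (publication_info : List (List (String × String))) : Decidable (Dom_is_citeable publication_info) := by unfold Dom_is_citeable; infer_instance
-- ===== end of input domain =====

-- B replaces A's two separate any(...) scans with one loop carrying two flags and an early exit (objective: alternative decomposition).

-- ===== PORT A =====
-- `key in item` on a dict = membership among the keys of the association list
def pvItemHasPubInfo (item : List (String × String)) : Bool :=
  (["journal_title", "journal_volume"] : List String).all
    (fun key => item.any (fun p => p.1 == key))

def pvItemHasPageOrArtid (item : List (String × String)) : Bool :=
  (["page_start", "artid"] : List String).any
    (fun key => item.any (fun p => p.1 == key))

def is_citeable (publication_info : List (List (String × String))) : Bool :=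
  let has_pub_info := publication_info.any (fun item => pvItemHasPubInfo item)
  let has_page_or_artid := publication_info.any (fun item => pvItemHasPageOrArtid item)
  has_pub_info && has_page_or_artid

-- ===== PORT B =====
-- the loop of Source B: two flags, early return once both are set
def pvCiteLoop : List (List (String × String)) → Bool → Bool → Bool
  | [], hasPub, hasPage => hasPub && hasPage
  | item :: rest, hasPub, hasPage =>
      let hasPub' := hasPub ||
        (item.any (fun p => p.1 == "journal_title") && item.any (fun p => p.1 == "journal_volume"))
      let hasPage' := hasPage ||
        (item.any (fun p => p.1 == "page_start") || item.any (fun p => p.1 == "artid"))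
      if hasPub' && hasPage' then true else pvCiteLoop rest hasPub' hasPage'

def is_citeable_alt (publication_info : List (List (String × String))) : Bool :=
  pvCiteLoop publication_info false false

-- ===== PRECONDITION & SPEC =====
def Spec_is_citeable (publication_info : List (List (String × String))) (out : Bool) : Prop := out = is_citeable_alt publication_info
instance (publication_info : List (List (String × String))) (out : Bool) : Decidable (Spec_is_citeable publication_info out) := by unfold Spec_is_citeable; infer_instance

-- ===== CLAIM (what is proved, stated in full; the proofs are below) =====
def Claim_equal_is_citeable : Prop := ∀ (publication_info : List (List (String × String))), Dom_is_citeable publication_info → Spec_is_citeable publication_info (is_citeable publication_info)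

-- ===== LEMMAS AND PROOFS =====

-- invariant: the loop computes (hasPub ∨ any pub-info item) ∧ (hasPage ∨ any page/artid item)
theorem pvCiteLoop_eq (l : List (List (String × String))) (a b : Bool) :
    pvCiteLoop l a b =
      ((a || l.any (fun item => pvItemHasPubInfo item)) &&
       (b || l.any (fun item => pvItemHasPageOrArtid item))) := by
  induction l generalizing a b with
  | nil => simp [pvCiteLoop]
  | cons item rest ih =>
      simp only [pvCiteLoop, List.any_cons, ih, pvItemHasPubInfo, pvItemHasPageOrArtid,
        List.all_cons, List.all_nil, List.any_nil]
      cases a <;> cases b <;>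
        cases item.any (fun p => p.1 == "journal_title") <;>
        cases item.any (fun p => p.1 == "journal_volume") <;>
        cases item.any (fun p => p.1 == "page_start") <;>
        cases item.any (fun p => p.1 == "artid") <;> simp

-- ===== VERDICT (by name: the statement is the Claim_ definition above) =====
theorem is_citeable_spec : Claim_equal_is_citeable := by
  intro pi _
  unfold Spec_is_citeable is_citeable is_citeable_alt
  rw [pvCiteLoop_eq]
  simp
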